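-- pv_equiv track=rewrite | github.com/monzag/python-lightweight-erp-project-pylamas | ui.py | create_data_row
-- ===== SOURCE A (Python) =====
-- def create_data_row(table, list_index, title_list, MIN_COLUMN_WIDTH, CELL_PADDING, is_title=False):
--     '''
--     Generates a string to be later printed as an row with data in a table.
--
--     Args:
--         table: list of lists of all the strings
--         list_index: int (index of a specific list in a table)
--         title_list: list of titles of columns that will be printed in a complete table
--         MIN_COLUMN_WIDTH: int
--         CELL_PADDING: int
--         is_title: boolean (if True, creates title row, if False, creates data row)
--
--     Returns:
--         data_row: string ready to be printed
--     '''
--     data_row = '|'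
--
--     for i in range(len(table[list_index])):
--         max_string_length = find_max_string_length(table, i, title_list)
--         if max_string_length >= MIN_COLUMN_WIDTH:
--             cell_width = max_string_length + CELL_PADDING
--         else:
--             cell_width = MIN_COLUMN_WIDTH
--
--         if is_title == False:
--             data_row = data_row + (table[list_index][i].center(cell_width, ' ')) + '|'
--         else:
--             data_row = data_row + (title_list[i].center(cell_width, ' ')) + '|'
--
--     return data_row
--
-- def find_max_string_length(table, item_index, title_list):
--     '''
--     Finds longest string from all items with a specific index that will be printed in one column
--
--     Args:
--         table: list of lists of all the strings
--         item_index: int (specific index in lists in table)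
--         title_list: list of titles of columns that will be printed in a complete table
--
--     Returns:
--         int (longest length value for a given index)
--     '''
--     longest_string = ''
--
--     for a_list in table:
--         if len(str(a_list[item_index])) > len(longest_string):
--             longest_string = str(a_list[item_index])
--
--     if len(str(title_list[item_index])) > len(longest_string):
--         longest_string = str(title_list[item_index])
--
--     longest_value = len(longest_string)
--
--     return longest_value
-- ===== SOURCE B (Python) =====
-- def create_data_row(table, list_index, title_list, MIN_COLUMN_WIDTH, CELL_PADDING, is_title=False):
--     n = len(table[list_index])
--     # one row-major pass over the table tracking per-column max lengths
--     maxes = [0] * n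
--     for a_list in table:
--         maxes = [max(m, len(str(a_list[i]))) for i, m in enumerate(maxes)]
--     maxes = [max(m, len(str(title_list[i]))) for i, m in enumerate(maxes)]
--     widths = [m + CELL_PADDING if m >= MIN_COLUMN_WIDTH else MIN_COLUMN_WIDTH
--               for m in maxes]
--     cells = title_list if is_title else table[list_index]
--     parts = [cells[i].center(w, ' ') + '|' for i, w in enumerate(widths)]
--     return '|' + ''.join(parts)
-- ===== Notes on version B (the rewrite author's own statement) =====
-- stated objective: alternative
-- what changed: A interleaves formatting with a fresh full-table scan per column (helper find_max_string_length); B first computes all per-column maximum lengths in one row-major pass plus a title pass, derives the widths list, then formats the row in a separate join pass.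
import Mathlib
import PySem

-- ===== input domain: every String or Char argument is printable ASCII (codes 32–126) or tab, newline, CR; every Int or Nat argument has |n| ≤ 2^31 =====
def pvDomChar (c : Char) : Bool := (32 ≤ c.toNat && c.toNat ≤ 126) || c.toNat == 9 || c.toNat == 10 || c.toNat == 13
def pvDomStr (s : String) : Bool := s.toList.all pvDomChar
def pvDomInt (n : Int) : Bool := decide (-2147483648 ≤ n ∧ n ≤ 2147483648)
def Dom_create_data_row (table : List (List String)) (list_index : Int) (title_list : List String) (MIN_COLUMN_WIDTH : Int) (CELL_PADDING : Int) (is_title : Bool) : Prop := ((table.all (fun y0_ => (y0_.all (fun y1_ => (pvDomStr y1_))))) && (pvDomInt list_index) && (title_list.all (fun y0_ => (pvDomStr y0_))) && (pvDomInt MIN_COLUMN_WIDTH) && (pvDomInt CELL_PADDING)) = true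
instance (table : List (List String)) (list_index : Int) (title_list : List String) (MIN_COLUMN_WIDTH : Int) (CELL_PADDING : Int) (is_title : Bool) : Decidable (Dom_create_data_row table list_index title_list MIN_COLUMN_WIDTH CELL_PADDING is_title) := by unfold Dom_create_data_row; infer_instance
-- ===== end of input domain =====

-- B replaces A's per-column repeated full-table scan by a table-first decomposition (one
-- row-major pass building the per-column max-length list, then a widths list, then one
-- formatting/join pass); equal cost, different structure ("alternative").

-- shared hand-port of CPython str.center(width, ' ') (PySem has no center primitive):
-- exact: if width <= len(s) return s, else left margin = marg//2 + (marg & width & 1)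
def pyCenter (s : String) (width : Int) : String :=
  let n : Int := PySem.Str.len s
  let marg := width - n
  if marg ≤ 0 then s
  else
    let left := PySem.Int.floordiv marg 2 +
      (if PySem.Int.mod marg 2 = 1 ∧ PySem.Int.mod width 2 = 1 then 1 else 0)
    String.ofList (List.replicate left.toNat ' ' ++ s.toList ++ List.replicate (marg - left).toNat ' ')

-- ===== PORT A =====
-- a_list[item_index] / title_list[item_index] are ported with pyGetD (exact under
-- Pre_create_data_row, which puts every accessed index in range; Python raises outside it)
def find_max_string_length (table : List (List String)) (item_index : Int) (title_list : List String) : Int :=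
  let longest_string :=
    table.foldl (fun longest a_list =>
      if PySem.Str.len (PySem.List.pyGetD a_list item_index "") > PySem.Str.len longest
      then PySem.List.pyGetD a_list item_index "" else longest) ""
  let longest_string :=
    if PySem.Str.len (PySem.List.pyGetD title_list item_index "") > PySem.Str.len longest_string
    then PySem.List.pyGetD title_list item_index "" else longest_string
  PySem.Str.len longest_string

def create_data_row (table : List (List String)) (list_index : Int) (title_list : List String) (MIN_COLUMN_WIDTH : Int) (CELL_PADDING : Int) (is_title : Bool) : String :=
  let row := (PySem.List.pyGet? table list_index).getD []   -- table[list_index]; in range under Pre_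
  (PySem.List.pyRange 0 (row.length : Int) 1).foldl (fun data_row i =>
    let max_string_length := find_max_string_length table i title_list
    let cell_width := if max_string_length ≥ MIN_COLUMN_WIDTH
                      then max_string_length + CELL_PADDING else MIN_COLUMN_WIDTH
    if is_title = false then
      data_row ++ pyCenter (PySem.List.pyGetD row i "") cell_width ++ "|"
    else
      data_row ++ pyCenter (PySem.List.pyGetD title_list i "") cell_width ++ "|") "|"

-- ===== PORT B =====
def create_data_row_alt (table : List (List String)) (list_index : Int) (title_list : List String) (MIN_COLUMN_WIDTH : Int) (CELL_PADDING : Int) (is_title : Bool) : String :=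
  let row := (PySem.List.pyGet? table list_index).getD []   -- table[list_index]; in range under Pre_
  let n := row.length
  let maxes0 := PySem.List.pyRepeat [(0 : Int)] (n : Int)   -- [0] * n
  let maxes := table.foldl (fun maxes a_list =>
      (PySem.List.enumerate maxes 0).map
        (fun p => max p.2 (PySem.Str.len (PySem.List.pyGetD a_list p.1 "")))) maxes0
  let maxes := (PySem.List.enumerate maxes 0).map
        (fun p => max p.2 (PySem.Str.len (PySem.List.pyGetD title_list p.1 "")))
  let widths := maxes.map (fun m =>
      if m ≥ MIN_COLUMN_WIDTH then m + CELL_PADDING else MIN_COLUMN_WIDTH)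
  let cells := if is_title then title_list else row
  let parts := (PySem.List.enumerate widths 0).map
        (fun p => pyCenter (PySem.List.pyGetD cells p.1 "") p.2 ++ "|")
  "|" ++ PySem.Str.join "" parts

-- ===== PRECONDITION & SPEC =====
-- Pre_ = exactly the inputs where Python A returns: list_index in range, and every table row
-- and title_list long enough for every scanned column (otherwise Python raises IndexError)
def Pre_create_data_row (table : List (List String)) (list_index : Int) (title_list : List String) (MIN_COLUMN_WIDTH : Int) (CELL_PADDING : Int) (is_title : Bool) : Prop :=
  PySem.Raise.InRange table.length list_index ∧
  (∀ r ∈ table, ((PySem.List.pyGet? table list_index).getD []).length ≤ r.length) ∧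
  ((PySem.List.pyGet? table list_index).getD []).length ≤ title_list.length

instance (table : List (List String)) (list_index : Int) (title_list : List String) (MIN_COLUMN_WIDTH : Int) (CELL_PADDING : Int) (is_title : Bool) : Decidable (Pre_create_data_row table list_index title_list MIN_COLUMN_WIDTH CELL_PADDING is_title) := by unfold Pre_create_data_row; infer_instance

def pvWitness_create_data_row : List (List String) × Int × List String × Int × Int × Bool :=
  ([["ab", "c"], ["d", "efg"]], 0, ["T1", "T2"], 4, 1, false)

def Spec_create_data_row (table : List (List String)) (list_index : Int) (title_list : List String) (MIN_COLUMN_WIDTH : Int) (CELL_PADDING : Int) (is_title : Bool) (out : String) : Prop := out = create_data_row_alt table list_index title_list MIN_COLUMN_WIDTH CELL_PADDING is_title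
instance (table : List (List String)) (list_index : Int) (title_list : List String) (MIN_COLUMN_WIDTH : Int) (CELL_PADDING : Int) (is_title : Bool) (out : String) : Decidable (Spec_create_data_row table list_index title_list MIN_COLUMN_WIDTH CELL_PADDING is_title out) := by unfold Spec_create_data_row; infer_instance

-- ===== CLAIM (what is proved, stated in full; the proofs are below) =====
def Claim_equal_create_data_row : Prop := ∀ (table : List (List String)) (list_index : Int) (title_list : List String) (MIN_COLUMN_WIDTH : Int) (CELL_PADDING : Int) (is_title : Bool), Dom_create_data_row table list_index title_list MIN_COLUMN_WIDTH CELL_PADDING is_title → Pre_create_data_row table list_index title_list MIN_COLUMN_WIDTH CELL_PADDING is_title → Spec_create_data_row table list_index title_list MIN_COLUMN_WIDTH CELL_PADDING is_title (create_data_row table list_index title_list MIN_COLUMN_WIDTH CELL_PADDING is_title)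

-- ===== LEMMAS AND PROOFS =====

-- the per-column max step shared by the characterisations of both ports
def colStep (j : Int) (m : Int) (a : List String) : Int :=
  max m (PySem.Str.len (PySem.List.pyGetD a j ""))

-- A's longest-string loop, measured: length of the picked string = running max of lengths
theorem len_foldl_pick (t : List (List String)) (j : Int) (init : String) :
    PySem.Str.len (t.foldl (fun longest a_list =>
      if PySem.Str.len (PySem.List.pyGetD a_list j "") > PySem.Str.len longest
      then PySem.List.pyGetD a_list j "" else longest) init)
    = t.foldl (colStep j) (PySem.Str.len init) := by
  induction t generalizing init with
  | nil => rfl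
  | cons a t ih =>
    simp only [List.foldl_cons]
    rw [ih]
    congr 1
    unfold colStep
    split_ifs with h <;> omega

theorem find_max_eq (table : List (List String)) (j : Int) (title_list : List String) :
    find_max_string_length table j title_list
    = max (table.foldl (colStep j) 0) (PySem.Str.len (PySem.List.pyGetD title_list j "")) := by
  have h0 : PySem.Str.len "" = 0 := by decide
  have h := len_foldl_pick table j ""
  rw [h0] at h
  simp only [find_max_string_length]
  split_ifs with hc <;> omega

-- helper: an enumerated range-map, mapped through a max step, is again a range-map
theorem enum_map_max (n : Nat) (G : Int → Int) (g : Int → Int) :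
    (PySem.List.enumerate ((PySem.List.pyRange 0 (n : Int) 1).map G) 0).map
      (fun p => max p.2 (g p.1))
    = (PySem.List.pyRange 0 (n : Int) 1).map (fun j => max (G j) (g j)) := by
  apply List.ext_getElem
  · simp [PySem.List.length_enumerate]
  · intro k h1 h2
    simp [PySem.List.getElem_enumerate, PySem.List.getElem_pyRange_one]

-- helper: same collapse for the formatting pass
theorem enum_map_parts (n : Nat) (G : Int → Int) (c : Int → String) :
    (PySem.List.enumerate ((PySem.List.pyRange 0 (n : Int) 1).map G) 0).map
      (fun p => pyCenter (c p.1) p.2 ++ "|")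
    = (PySem.List.pyRange 0 (n : Int) 1).map (fun j => pyCenter (c j) (G j) ++ "|") := by
  apply List.ext_getElem
  · simp [PySem.List.length_enumerate]
  · intro k h1 h2
    simp [PySem.List.getElem_enumerate, PySem.List.getElem_pyRange_one]

-- B's row-major fold keeps the accumulator a range-map and folds each column independently
theorem maxes_fold (t : List (List String)) (n : Nat) (G : Int → Int) :
    t.foldl (fun maxes a_list =>
      (PySem.List.enumerate maxes 0).map
        (fun p => max p.2 (PySem.Str.len (PySem.List.pyGetD a_list p.1 "")))) ((PySem.List.pyRange 0 (n : Int) 1).map G)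
    = (PySem.List.pyRange 0 (n : Int) 1).map (fun j => t.foldl (colStep j) (G j)) := by
  induction t generalizing G with
  | nil => rfl
  | cons a t ih =>
    simp only [List.foldl_cons]
    rw [enum_map_max n G (fun j => PySem.Str.len (PySem.List.pyGetD a j ""))]
    rw [ih (fun j => max (G j) (PySem.Str.len (PySem.List.pyGetD a j "")))]
    rfl

-- [0] * n is the constant range-map
theorem replicate_eq_range_map (n : Nat) (c : Int) :
    List.replicate n c = (PySem.List.pyRange 0 (n : Int) 1).map (fun _ => c) := by
  apply List.ext_getElem
  · simp [PySem.List.length_pyRange_one]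
  · intro k h1 h2
    simp

theorem chars_join_nil_cons (x : List Char) (xs : List (List Char)) :
    PySem.Chars.join [] (x :: xs) = x ++ PySem.Chars.join [] xs := by
  cases xs with
  | nil => simp [PySem.Chars.join_singleton, PySem.Chars.join_nil]
  | cons y ys => rw [PySem.Chars.join_cons_cons]; simp

-- string fold-append is "join" of the mapped segments
theorem foldl_append_join {a : Type} (l : List a) (g : a → String) (init : String) :
    l.foldl (fun acc x => acc ++ g x) init = init ++ PySem.Str.join "" (l.map g) := by
  induction l generalizing init with
  | nil =>
    apply String.toList_inj.mp
    simp [PySem.Str.toList_join, PySem.Chars.join_nil]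
  | cons a l ih =>
    simp only [List.foldl_cons, List.map_cons]
    rw [ih]
    apply String.toList_inj.mp
    simp [PySem.Str.toList_join, chars_join_nil_cons]

-- string fold-append with a trailing separator, as "join"
theorem foldl_append3 {a : Type} (l : List a) (g : a → String) (init : String) :
    l.foldl (fun acc x => acc ++ g x ++ "|") init
    = init ++ PySem.Str.join "" (l.map (fun x => g x ++ "|")) := by
  rw [← foldl_append_join l (fun x => g x ++ "|") init]
  congr 1
  funext acc x
  rw [String.append_assoc]

-- ===== VERDICT (by name: the statement is the Claim_ definition above) =====
theorem create_data_row_spec : Claim_equal_create_data_row := by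
  intro table list_index title_list MIN_COLUMN_WIDTH CELL_PADDING is_title _ _
  unfold Spec_create_data_row
  simp only [create_data_row, create_data_row_alt]
  rw [PySem.List.pyRepeat_singleton, Int.toNat_natCast,
      replicate_eq_range_map ((PySem.List.pyGet? table list_index).getD []).length 0,
      maxes_fold table ((PySem.List.pyGet? table list_index).getD []).length (fun _ => 0),
      enum_map_max ((PySem.List.pyGet? table list_index).getD []).length
        (fun j => table.foldl (colStep j) 0)
        (fun j => PySem.Str.len (PySem.List.pyGetD title_list j "")),
      List.map_map,
      enum_map_parts ((PySem.List.pyGet? table list_index).getD []).length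
        ((fun m => if m ≥ MIN_COLUMN_WIDTH then m + CELL_PADDING else MIN_COLUMN_WIDTH) ∘
          (fun j => max ((fun j => table.foldl (colStep j) 0) j)
            ((fun j => PySem.Str.len (PySem.List.pyGetD title_list j "")) j)))
        (fun j => PySem.List.pyGetD
          (if is_title = true then title_list else (PySem.List.pyGet? table list_index).getD []) j "")]
  cases is_title
  · simp only [Bool.false_eq_true, reduceIte]
    rw [foldl_append3]
    simp only [find_max_eq, Function.comp]
  · simp only [Bool.true_eq_false, reduceIte]
    rw [foldl_append3]
    simp only [find_max_eq, Function.comp]
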